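-- pv_equiv track=rewrite | github.com/coder2hacker/Explore-open-source | Advent_of_Code_2015_Python/Day_1/Day_1.py | santa_movement_II
-- ===== SOURCE A (Python) =====
-- def santa_movement_II(floors):
--     count = 0
--     for index, floor in enumerate(floors,start=1):
--         if floor == '(':
--             count += 1
--         else:
--             count -= 1
--             if count == -1: return index
--     return count
-- ===== SOURCE B (Python) =====
-- def santa_movement_II(floors):
--     # Two-phase decomposition: build the full cumulative floor sequence first,
--     # then scan it for the first position whose value is -1.
--     cum = []
--     total = 0
--     for f in floors:
--         total += 1 if f == '(' else -1
--         cum.append(total)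
--     for i, c in enumerate(cum, 1):
--         if c == -1:
--             return i
--     return cum[-1] if cum else 0
-- ===== Notes on version B (the rewrite author's own statement) =====
-- stated objective: alternative
-- what changed: A's single early-exiting pass that maintains a running counter is split into two phases: first a full cumulative-sum table of the floor sequence is built, then a separate scan finds the first index whose cumulative value is -1, falling back to the last table entry (or 0 when empty).
import Mathlib
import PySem

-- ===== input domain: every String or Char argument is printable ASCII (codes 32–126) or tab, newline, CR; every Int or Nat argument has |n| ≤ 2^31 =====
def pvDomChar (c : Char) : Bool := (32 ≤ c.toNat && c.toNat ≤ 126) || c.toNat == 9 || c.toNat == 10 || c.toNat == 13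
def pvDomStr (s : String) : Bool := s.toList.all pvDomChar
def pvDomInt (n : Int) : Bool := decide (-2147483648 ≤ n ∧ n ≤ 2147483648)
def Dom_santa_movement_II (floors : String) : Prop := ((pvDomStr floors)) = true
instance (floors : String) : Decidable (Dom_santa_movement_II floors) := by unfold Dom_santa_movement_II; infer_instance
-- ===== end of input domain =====

-- B builds the full cumulative sequence first, then scans it separately; same value as A's single early-exiting pass.

-- ===== PORT A =====
-- A's single pass: counter, early return of the 1-based index when count hits -1.
def santaGoA : List Char → Int → Int → Int
  | [], _, count => count
  | c :: rest, index, count =>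
    if c = '(' then santaGoA rest (index + 1) (count + 1)
    else if count - 1 = -1 then index
    else santaGoA rest (index + 1) (count - 1)

def santa_movement_II (floors : String) : Int := santaGoA floors.toList 1 0

-- ===== PORT B =====
-- phase 1 of Source B: cum.append(total) loop
def santaBuildCum : List Char → Int → List Int
  | [], _ => []
  | c :: rest, total =>
    let t := total + (if c = '(' then 1 else -1)
    t :: santaBuildCum rest t

-- phase 2 of Source B: enumerate(cum, 1) scan for the first -1
def santaFindNeg1 : List Int → Int → Option Int
  | [], _ => none
  | c :: rest, i => if c = -1 then some i else santaFindNeg1 rest (i + 1)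

def santa_movement_II_alt (floors : String) : Int :=
  let cum := santaBuildCum floors.toList 0
  match santaFindNeg1 cum 1 with
  | some i => i
  | none => match cum.getLast? with
            | some v => v
            | none => 0

-- ===== PRECONDITION & SPEC =====
def Spec_santa_movement_II (floors : String) (out : Int) : Prop := out = santa_movement_II_alt floors
instance (floors : String) (out : Int) : Decidable (Spec_santa_movement_II floors out) := by unfold Spec_santa_movement_II; infer_instance

-- ===== CLAIM (what is proved, stated in full; the proofs are below) =====
def Claim_equal_santa_movement_II : Prop := ∀ (floors : String), Dom_santa_movement_II floors → Spec_santa_movement_II floors (santa_movement_II floors)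

-- ===== LEMMAS AND PROOFS =====

-- B's result as a function of the suffix, the running index and the running total.
def santaRes (l : List Char) (idx total : Int) : Int :=
  match santaFindNeg1 (santaBuildCum l total) idx with
  | some i => i
  | none => ((santaBuildCum l total).getLast?).getD total

theorem santa_getLast_cons (x : Int) (xs : List Int) (d : Int) :
    ((x :: xs).getLast?).getD d = (xs.getLast?).getD x := by
  induction xs generalizing x d with
  | nil => simp
  | cons y ys ih => rw [List.getLast?_cons_cons, ih, ih]

theorem santaRes_cons (c : Char) (rest : List Char) (idx total : Int) :
    santaRes (c :: rest) idx total =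
      (if (total + (if c = '(' then 1 else -1)) = -1 then idx
       else santaRes rest (idx + 1) (total + (if c = '(' then 1 else -1))) := by
  by_cases h : (total + (if c = '(' then 1 else -1)) = -1
  · simp [santaRes, santaBuildCum, santaFindNeg1, h]
  · rw [if_neg h]
    simp only [santaRes, santaBuildCum, santaFindNeg1, h, if_false]
    cases hf : santaFindNeg1 (santaBuildCum rest (total + (if c = '(' then 1 else -1))) (idx + 1) with
    | some i => simp
    | none => simp [santa_getLast_cons]

theorem santaGoA_eq_res (l : List Char) : ∀ (idx total : Int), 0 ≤ total →
    santaGoA l idx total = santaRes l idx total := by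
  induction l with
  | nil => intro idx total _; simp [santaGoA, santaRes, santaFindNeg1, santaBuildCum]
  | cons c rest ih =>
    intro idx total htot
    rw [santaRes_cons]
    by_cases hc : c = '('
    · subst hc
      have hne : ¬ ((total + (if ('(' : Char) = '(' then 1 else -1)) = -1) := by rw [if_pos rfl]; omega
      rw [if_neg hne]
      simp only [santaGoA]
      exact ih _ _ (by omega)
    · simp only [santaGoA, hc, if_false]
      by_cases h0 : total = 0
      · rw [if_pos (by omega : total + -1 = -1), if_pos (by omega : total - 1 = -1)]
      · rw [if_neg (by omega : ¬ total + -1 = -1), if_neg (by omega : ¬ total - 1 = -1)]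
        have := ih (idx + 1) (total - 1) (by omega)
        simpa [sub_eq_add_neg] using this

theorem santa_alt_eq_res (floors : String) :
    santa_movement_II_alt floors = santaRes floors.toList 1 0 := by
  simp only [santa_movement_II_alt, santaRes]
  cases hf : santaFindNeg1 (santaBuildCum floors.toList 0) 1 with
  | some i => simp
  | none => cases h : (santaBuildCum floors.toList 0).getLast? <;> simp

-- ===== VERDICT (by name: the statement is the Claim_ definition above) =====
theorem santa_movement_II_spec : Claim_equal_santa_movement_II := by
  intro floors _
  unfold Spec_santa_movement_II santa_movement_II
  rw [santa_alt_eq_res, santaGoA_eq_res _ _ _ (le_refl 0)]
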